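-- pv_equiv track=rewrite | github.com/ayahuasca09/ayahuasca | func/媒体资源占位生成打包版.py | find_event_parent_match
-- ===== SOURCE A (Python) =====
-- def find_event_parent_match(dict1, string):
--     # 将字符串拆分为列表
--     string_list = string.split('_')
--
--     # 过滤符合条件的键
--     valid_keys = [
--         key for key in dict1.keys()
--         if all(part in string_list for part in key.split('_'))
--     ]
--
--     if valid_keys:
--         # 找出最长的键
--         longest_key = max(valid_keys, key=len)
--         return longest_key
--     else:
--         return None
-- ===== SOURCE B (Python) =====
-- def find_event_parent_match(dict1, string):
--     parts = string.split('_')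
--     for key in sorted(dict1.keys(), key=len, reverse=True):
--         if all(p in parts for p in key.split('_')):
--             return key
--     return None
-- ===== Notes on version B (the rewrite author's own statement) =====
-- stated objective: alternative
-- what changed: Instead of filtering all valid keys and then scanning them with max(key=len), B stably sorts the keys by descending length once and returns the first key whose '_'-parts all occur in the string's parts, short-circuiting the scan.
import Mathlib
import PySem

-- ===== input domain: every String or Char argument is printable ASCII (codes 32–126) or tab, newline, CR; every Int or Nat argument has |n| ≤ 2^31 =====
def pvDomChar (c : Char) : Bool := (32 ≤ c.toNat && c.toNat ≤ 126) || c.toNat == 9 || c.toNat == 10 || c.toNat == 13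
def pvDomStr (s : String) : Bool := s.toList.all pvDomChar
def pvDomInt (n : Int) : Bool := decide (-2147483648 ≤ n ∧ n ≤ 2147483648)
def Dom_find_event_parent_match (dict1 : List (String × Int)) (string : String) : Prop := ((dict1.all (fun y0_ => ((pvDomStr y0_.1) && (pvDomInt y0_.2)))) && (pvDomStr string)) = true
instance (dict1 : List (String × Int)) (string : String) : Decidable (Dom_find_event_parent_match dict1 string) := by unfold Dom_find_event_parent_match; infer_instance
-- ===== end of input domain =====

-- B replaces A's filter-all-keys-then-max(key=len) by a stable descending-length sort of the keys
-- followed by a short-circuiting scan returning the first valid key (objective: alternative decomposition).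

-- s.split('_'): PySem.Str.split? is none only for an empty separator, so .getD [] is exact here
def pvSplitU (s : String) : List String := (PySem.Str.split? s "_").getD []

-- shared tiny predicate: "all '_'-parts of k occur in parts" (inline in both Pythons)
def pvKeyOk (parts : List String) (k : String) : Bool :=
  (pvSplitU k).all (fun part => parts.contains part)

-- ===== PORT A =====
def find_event_parent_match (dict1 : List (String × Int)) (string : String) : Option String :=
  let string_list := pvSplitU string
  let valid_keys := (PySem.List.dedup (dict1.map Prod.fst)).filter (pvKeyOk string_list)
  if valid_keys ≠ [] then
    PySem.List.max? valid_keys (fun k => PySem.Str.len k)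
  else
    none

-- ===== PORT B =====
-- the for-loop with early return of Source B
def pvFirstMatch (parts : List String) : List String → Option String
  | [] => none
  | k :: rest => if pvKeyOk parts k then some k else pvFirstMatch parts rest

def find_event_parent_match_alt (dict1 : List (String × Int)) (string : String) : Option String :=
  let parts := pvSplitU string
  pvFirstMatch parts
    (PySem.List.sorted (PySem.List.dedup (dict1.map Prod.fst)) (fun k => PySem.Str.len k) true)

-- ===== PRECONDITION & SPEC =====
def Spec_find_event_parent_match (dict1 : List (String × Int)) (string : String) (out : Option String) : Prop := out = find_event_parent_match_alt dict1 string
instance (dict1 : List (String × Int)) (string : String) (out : Option String) : Decidable (Spec_find_event_parent_match dict1 string out) := by unfold Spec_find_event_parent_match; infer_instance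

-- ===== CLAIM (what is proved, stated in full; the proofs are below) =====
def Claim_equal_find_event_parent_match : Prop := ∀ (dict1 : List (String × Int)) (string : String), Dom_find_event_parent_match dict1 string → Spec_find_event_parent_match dict1 string (find_event_parent_match dict1 string)

-- ===== LEMMAS AND PROOFS =====

theorem pvFirstMatch_mem {parts : List String} {s : List String} {m : String}
    (h : pvFirstMatch parts s = some m) : m ∈ s := by
  induction s with
  | nil => simp [pvFirstMatch] at h
  | cons y t ih =>
    simp only [pvFirstMatch] at h
    split at h
    · simp_all
    · exact List.mem_cons_of_mem _ (ih h)

theorem pvFirstMatch_insertBy_neg {parts : List String} {x : String}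
    (before : String → String → Bool) (s : List String)
    (hx : pvKeyOk parts x = false) :
    pvFirstMatch parts (PySem.List.insertBy before x s) = pvFirstMatch parts s := by
  induction s with
  | nil => simp [PySem.List.insertBy, pvFirstMatch, hx]
  | cons y t ih =>
    by_cases hb : before x y
    · simp [PySem.List.insertBy, hb, pvFirstMatch, hx]
    · simp only [PySem.List.insertBy, hb]
      simp only [Bool.false_eq_true, if_false, pvFirstMatch]
      rw [ih]

-- Python max(key=f)'s accumulator step (proof helper)
def pvStep (f : String → Int) (acc : Option String) (x : String) : Option String :=
  match acc with
  | none => some x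
  | some m => if f m < f x then some x else some m

theorem pvFoldl_congr_pvStep (f : String → Int) (l : List String)
    (g : Option String → String → Option String)
    (hg : ∀ acc x, g acc x = pvStep f acc x) :
    ∀ acc, List.foldl g acc l = List.foldl (pvStep f) acc l := by
  induction l with
  | nil => intro acc; rfl
  | cons y t ih =>
    intro acc
    simp only [List.foldl_cons, hg]
    exact ih _

theorem pvMax?_eq_foldl_pvStep (f : String → Int) (l : List String) :
    PySem.List.max? l f = l.foldl (pvStep f) none := by
  simp only [PySem.List.max?]
  refine pvFoldl_congr_pvStep f l _ (fun acc x => ?_) none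
  cases acc with
  | none => rfl
  | some m => by_cases hlt : f m < f x <;> simp [pvStep, hlt]

theorem pvFirstMatch_insertBy_pos {parts : List String} {x : String}
    (f : String → Int) (s : List String)
    (hx : pvKeyOk parts x = true)
    (hs : s.Pairwise (fun a b => f b ≤ f a)) :
    pvFirstMatch parts (PySem.List.insertBy (fun a b => decide (f b < f a)) x s) =
      pvStep f (pvFirstMatch parts s) x := by
  induction s with
  | nil => simp [PySem.List.insertBy, pvFirstMatch, pvStep, hx]
  | cons y t ih =>
    have hpw : t.Pairwise (fun a b => f b ≤ f a) := (List.pairwise_cons.mp hs).2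
    have hy : ∀ z ∈ t, f z ≤ f y := (List.pairwise_cons.mp hs).1
    by_cases hb : f y < f x
    · have hins : PySem.List.insertBy (fun a b => decide (f b < f a)) x (y :: t) = x :: y :: t := by
        simp [PySem.List.insertBy, hb]
      rw [hins, show pvFirstMatch parts (x :: y :: t) = some x by simp [pvFirstMatch, hx]]
      cases hm : pvFirstMatch parts (y :: t) with
      | none => rfl
      | some m =>
        have hlt : f m < f x := by
          rcases List.mem_cons.mp (pvFirstMatch_mem hm) with h | h
          · exact h ▸ hb
          · exact lt_of_le_of_lt (hy m h) hb
        simp [pvStep, hlt]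
    · have hins : PySem.List.insertBy (fun a b => decide (f b < f a)) x (y :: t) =
          y :: PySem.List.insertBy (fun a b => decide (f b < f a)) x t := by
        simp [PySem.List.insertBy, hb]
      rw [hins]
      by_cases hky : pvKeyOk parts y
      · simp [pvFirstMatch, pvStep, hky, hb]
      · simp only [pvFirstMatch, hky, Bool.false_eq_true, if_false]
        exact ih hpw

theorem pvMax?_append_singleton (f : String → Int) (l : List String) (x : String) :
    PySem.List.max? (l ++ [x]) f = pvStep f (PySem.List.max? l f) x := by
  rw [pvMax?_eq_foldl_pvStep, pvMax?_eq_foldl_pvStep, List.foldl_append, List.foldl_cons,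
    List.foldl_nil]

-- core: scanning the descending stable sort = max-by-len over the filtered keys
theorem pvFirstMatch_sorted_eq_max? (parts : List String) (f : String → Int) (l : List String) :
    pvFirstMatch parts (PySem.List.sorted l f true) =
      PySem.List.max? (l.filter (pvKeyOk parts)) f := by
  induction l using List.reverseRecOn with
  | nil => simp [PySem.List.sorted, pvFirstMatch, PySem.List.max?]
  | append_singleton l x ih =>
    have hstep : PySem.List.sorted (l ++ [x]) f true =
        PySem.List.insertBy (fun a b => decide (f b < f a)) x (PySem.List.sorted l f true) := by
      rw [PySem.List.sorted_rev_eq_foldl_insertBy, PySem.List.sorted_rev_eq_foldl_insertBy,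
        List.foldl_append]
      rfl
    rw [hstep, List.filter_append]
    by_cases hx : pvKeyOk parts x
    · rw [pvFirstMatch_insertBy_pos f _ hx (PySem.List.sorted_pairwise_rev l f), ih]
      simp [hx, pvMax?_append_singleton]
    · rw [pvFirstMatch_insertBy_neg _ _ (by simpa using hx), ih]
      simp [hx]

-- ===== VERDICT (by name: the statement is the Claim_ definition above) =====
theorem find_event_parent_match_spec : Claim_equal_find_event_parent_match := by
  intro dict1 string _
  unfold Spec_find_event_parent_match find_event_parent_match find_event_parent_match_alt
  rw [pvFirstMatch_sorted_eq_max?]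
  dsimp only
  split_ifs with h
  · rfl
  · rw [not_not.mp h]
    rfl
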